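-- pv_equiv track=rewrite | github.com/armandocacace/Calcolatore_CF | codice_fiscale.py | calcola_cognome_cf
-- ===== SOURCE A (Python) =====
-- def calcola_cognome_cf(cognome):
--     vocali = "AEIOU"
--     cognome = cognome.upper()
--
--     # Estraiamo consonanti e vocali
--     consonanti = [c for c in cognome if c.isalpha() and c not in vocali]
--
--     vocali_trovate = [c for c in cognome if c.isalpha() and c in vocali]
--
--     # Costruiamo la stringa iniziale con consonanti + vocali
--     cf = "".join(consonanti) + "".join(vocali_trovate)
--
--     # Completamento con 'X' se meno di 3 caratteri
--     cf = (cf + "XXX")[:3]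
--
--     return cf
-- ===== SOURCE B (Python) =====
-- def calcola_cognome_cf(cognome):
--     letters = [c for c in cognome.upper() if c.isalpha()]
--     # stable sort: consonants (key False) first, vowels (key True) after,
--     # each group keeping its original order
--     ordered = sorted(letters, key=lambda c: c in "AEIOU")
--     return ("".join(ordered) + "XXX")[:3]
-- ===== Notes on version B (the rewrite author's own statement) =====
-- stated objective: alternative
-- what changed: Replaces A's two separate consonant/vowel filtering passes by one alphabetic filter followed by a single stable sort keyed on vowel membership, relying on sort stability to reproduce the consonants-then-vowels order.
import Mathlib
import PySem

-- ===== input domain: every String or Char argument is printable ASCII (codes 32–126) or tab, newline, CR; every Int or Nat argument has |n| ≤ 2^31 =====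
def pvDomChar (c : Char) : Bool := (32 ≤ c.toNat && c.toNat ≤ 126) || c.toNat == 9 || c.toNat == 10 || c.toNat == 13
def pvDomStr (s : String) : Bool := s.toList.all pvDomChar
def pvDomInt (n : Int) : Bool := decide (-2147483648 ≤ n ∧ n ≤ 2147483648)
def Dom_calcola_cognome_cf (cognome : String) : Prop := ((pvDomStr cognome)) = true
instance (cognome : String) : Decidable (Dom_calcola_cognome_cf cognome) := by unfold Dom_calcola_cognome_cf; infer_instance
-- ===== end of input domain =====

-- B builds the surname code with one alphabetic filter plus a single stable bool-key sort
-- (vowels after consonants) instead of A's two separate filtering passes; same cost class.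


-- ===== PORT A =====
def calcola_cognome_cf (cognome : String) : String :=
  let vocali : List Char := "AEIOU".toList
  let cs := PySem.Chars.upper cognome.toList
  let consonanti := cs.filter (fun c => PySem.Chars.isalpha c && !decide (c ∈ vocali))
  let vocali_trovate := cs.filter (fun c => PySem.Chars.isalpha c && decide (c ∈ vocali))
  let cf := consonanti ++ vocali_trovate
  String.ofList (PySem.List.slice (cf ++ "XXX".toList) none (some 3))

-- ===== PORT B =====
def calcola_cognome_cf_alt (cognome : String) : String :=
  let letters := (PySem.Chars.upper cognome.toList).filter PySem.Chars.isalpha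
  let ordered := PySem.List.sorted letters (fun c => decide (c ∈ "AEIOU".toList)) false
  String.ofList (PySem.List.slice (ordered ++ "XXX".toList) none (some 3))

-- ===== PRECONDITION & SPEC =====
def Spec_calcola_cognome_cf (cognome : String) (out : String) : Prop := out = calcola_cognome_cf_alt cognome
instance (cognome : String) (out : String) : Decidable (Spec_calcola_cognome_cf cognome out) := by unfold Spec_calcola_cognome_cf; infer_instance

-- ===== CLAIM (what is proved, stated in full; the proofs are below) =====
def Claim_equal_calcola_cognome_cf : Prop := ∀ (cognome : String), Dom_calcola_cognome_cf cognome → Spec_calcola_cognome_cf cognome (calcola_cognome_cf cognome)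

-- ===== LEMMAS AND PROOFS =====

-- insertBy appends at the end when the element is never "before" anything in the list
lemma insertBy_all_false {α : Type} (before : α → α → Bool) (x : α) (l : List α)
    (h : ∀ y ∈ l, before x y = false) :
    PySem.List.insertBy before x l = l ++ [x] := by
  induction l with
  | nil => rfl
  | cons y ys ih =>
    have hy : before x y = false := h y (by simp)
    simp [PySem.List.insertBy, hy, ih (fun z hz => h z (by simp [hz]))]

-- inserting a key-false element into (false-block ++ true-block) lands at the end of the false-block
lemma insertBy_bool_false {α : Type} (key : α → Bool) (x : α) (F T : List α)
    (hx : key x = false) (hF : ∀ y ∈ F, key y = false) (hT : ∀ y ∈ T, key y = true) :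
    PySem.List.insertBy (fun a b => decide (key a < key b)) x (F ++ T) = F ++ x :: T := by
  induction F with
  | nil =>
    cases T with
    | nil => rfl
    | cons t ts =>
      simp only [List.nil_append, PySem.List.insertBy, hx, hT t (by simp), Bool.lt_iff,
        and_self, decide_true, if_true]
  | cons f fs ih =>
    have hf : key f = false := hF f (by simp)
    have hb : decide (key x < key f) = false := by simp [Bool.lt_iff, hf]
    simp only [List.cons_append, PySem.List.insertBy, hb, Bool.false_eq_true, if_false,
      List.cons.injEq, true_and]
    exact ih (fun y hy => hF y (by simp [hy]))

-- the stable sort on a Bool key is exactly: key-false elements first, key-true after, order kept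
lemma sorted_bool_key {α : Type} (xs : List α) (key : α → Bool) :
    PySem.List.sorted xs key false
      = xs.filter (fun x => !key x) ++ xs.filter key := by
  have main : ∀ (ys F T : List α), (∀ y ∈ F, key y = false) → (∀ y ∈ T, key y = true) →
      ys.foldl (fun acc x => PySem.List.insertBy (fun a b => decide (key a < key b)) x acc) (F ++ T)
        = (F ++ ys.filter (fun x => !key x)) ++ (T ++ ys.filter key) := by
    intro ys
    induction ys with
    | nil => intro F T _ _; simp
    | cons x xs ih =>
      intro F T hF hT
      simp only [List.foldl_cons]
      by_cases hx : key x = true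
      · have hstep : PySem.List.insertBy (fun a b => decide (key a < key b)) x (F ++ T)
            = F ++ (T ++ [x]) := by
          rw [insertBy_all_false]
          · simp
          · intro y _; simp [Bool.lt_iff, hx]
        rw [hstep, ih F (T ++ [x]) hF (by intro y hy; rcases List.mem_append.1 hy with h | h
                                          · exact hT y h
                                          · simp at h; subst h; exact hx)]
        simp [hx]
      · have hx' : key x = false := by simpa using hx
        have hstep : PySem.List.insertBy (fun a b => decide (key a < key b)) x (F ++ T)
            = (F ++ [x]) ++ T := by
          rw [insertBy_bool_false key x F T hx' hF hT]; simp
        rw [hstep, ih (F ++ [x]) T (by intro y hy; rcases List.mem_append.1 hy with h | h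
                                       · exact hF y h
                                       · simp at h; subst h; exact hx') hT]
        simp [hx']
  have := main xs [] [] (by simp) (by simp)
  simpa [PySem.List.sorted] using this

-- ===== VERDICT (by name: the statement is the Claim_ definition above) =====
theorem calcola_cognome_cf_spec : Claim_equal_calcola_cognome_cf := by
  intro cognome _
  unfold Spec_calcola_cognome_cf calcola_cognome_cf calcola_cognome_cf_alt
  simp only [sorted_bool_key, List.filter_filter]
  have h1 : ∀ (l : List Char),
      l.filter (fun a => !decide (a ∈ "AEIOU".toList) && PySem.Chars.isalpha a)
        = l.filter (fun c => PySem.Chars.isalpha c && !decide (c ∈ "AEIOU".toList)) :=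
    fun l => List.filter_congr (by intro c _; simp [Bool.and_comm])
  have h2 : ∀ (l : List Char),
      l.filter (fun a => decide (a ∈ "AEIOU".toList) && PySem.Chars.isalpha a)
        = l.filter (fun c => PySem.Chars.isalpha c && decide (c ∈ "AEIOU".toList)) :=
    fun l => List.filter_congr (by intro c _; simp [Bool.and_comm])
  rw [h1, h2]
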